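-- pv_equiv track=rewrite | github.com/jmauriliogl/PARADIGMAS-DE-PROGRAMACION | Lab4/cadena.py | conteo
-- ===== SOURCE A (Python) =====
-- def conteo(tipodecadena):
--     t = 0
--     n = len(tipodecadena)
--
--     for i in range(n):
--         if tipodecadena[i] == '(':
--             for j in range(i + 1, n):
--                 if tipodecadena[j] == ')':
--
--                     t += 2
--                     break
--     return t
-- ===== SOURCE B (Python) =====
-- def conteo(tipodecadena):
--     # every '(' strictly before the last ')' contributes 2
--     last = tipodecadena.rfind(')')
--     if last < 0:
--         return 0
--     return 2 * tipodecadena.count('(', 0, last)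
-- ===== Notes on version B (the rewrite author's own statement) =====
-- stated objective: faster
-- what changed: Replaced the nested scan (for each '(' search the rest of the string for a ')') by finding the position of the last ')' with str.rfind and counting the '(' before it with str.count, times 2.
import Mathlib
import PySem

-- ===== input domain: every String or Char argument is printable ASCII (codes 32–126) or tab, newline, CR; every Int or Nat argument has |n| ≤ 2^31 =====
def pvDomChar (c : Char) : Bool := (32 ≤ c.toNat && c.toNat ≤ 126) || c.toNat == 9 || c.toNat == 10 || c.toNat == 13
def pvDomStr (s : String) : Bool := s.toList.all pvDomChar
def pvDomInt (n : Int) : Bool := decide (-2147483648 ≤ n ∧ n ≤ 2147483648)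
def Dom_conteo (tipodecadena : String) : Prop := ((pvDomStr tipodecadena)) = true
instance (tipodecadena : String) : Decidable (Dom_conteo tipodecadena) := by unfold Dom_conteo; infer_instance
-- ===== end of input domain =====

-- B: one line in the header — B replaces A's nested scan by "last ')' position + count of '(' before it" (faster; same return value).
-- ===== PORT A =====
-- inner loop: for j in range(i+1, n): if s[j]==')': t += 2; break
def conteoInner : List Char → Int → Int
  | [], t => t
  | c :: rest, t => if c = ')' then t + 2 else conteoInner rest t

-- outer loop over positions i; `rest` is the characters after position i
def conteoLoop : List Char → Int → Int
  | [], t => t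
  | c :: rest, t => conteoLoop rest (if c = '(' then conteoInner rest t else t)

def conteo (tipodecadena : String) : Int :=
  conteoLoop tipodecadena.toList 0

-- ===== PORT B =====
-- hand port of str.rfind(')') : index of the first ')' in the reversed list (= distance from the right end)
def findClose : List Char → Option Nat
  | [] => none
  | c :: rest => if c = ')' then some 0 else (findClose rest).map (· + 1)

-- last = len - 1 - k; s.count('(', 0, last) = count of '(' in the first `last` characters
def conteoAltCore (cs : List Char) : Int :=
  match findClose cs.reverse with
  | none => 0
  | some k => 2 * ((cs.take (cs.length - 1 - k)).count '(')

def conteo_alt (tipodecadena : String) : Int :=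
  conteoAltCore tipodecadena.toList

-- ===== PRECONDITION & SPEC =====
def Spec_conteo (tipodecadena : String) (out : Int) : Prop := out = conteo_alt tipodecadena
instance (tipodecadena : String) (out : Int) : Decidable (Spec_conteo tipodecadena out) := by unfold Spec_conteo; infer_instance

-- ===== CLAIM (what is proved, stated in full; the proofs are below) =====
def Claim_equal_conteo : Prop := ∀ (tipodecadena : String), Dom_conteo tipodecadena → Spec_conteo tipodecadena (conteo tipodecadena)

-- ===== LEMMAS AND PROOFS =====

-- common characterisation: 2 per '(' that has a later ')'
def gCount : List Char → Int
  | [] => 0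
  | c :: rest => gCount rest + (if c = '(' ∧ ')' ∈ rest then 2 else 0)

theorem conteoInner_eq (rest : List Char) (t : Int) :
    conteoInner rest t = t + (if ')' ∈ rest then 2 else 0) := by
  induction rest generalizing t with
  | nil => simp [conteoInner]
  | cons c cs ih =>
    by_cases h : c = ')'
    · simp [conteoInner, h]
    · simp [conteoInner, h, ih, Ne.symm h]

theorem conteoLoop_eq (cs : List Char) (t : Int) :
    conteoLoop cs t = t + gCount cs := by
  induction cs generalizing t with
  | nil => simp [conteoLoop, gCount]
  | cons c rest ih =>
    by_cases h : c = '('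
    · simp only [conteoLoop, h, ih, conteoInner_eq, gCount]
      by_cases hm : ')' ∈ rest <;> simp [hm]
      ring
    · simp [conteoLoop, h, ih, gCount]

theorem gCount_append (ds : List Char) (c : Char) :
    gCount (ds ++ [c]) = if c = ')' then 2 * (ds.count '(' : Int) else gCount ds := by
  induction ds with
  | nil => simp [gCount]
  | cons x ds ih =>
    have hmem : (')' ∈ ds ++ [c]) ↔ (c = ')' ∨ ')' ∈ ds) := by
      simp [eq_comm, or_comm]
    simp only [List.cons_append, gCount, ih, hmem]
    by_cases h : c = ')'
    · by_cases hx : x = '(' <;> simp [h, hx]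
      ring
    · simp [h]

theorem conteoAltCore_eq (cs : List Char) : conteoAltCore cs = gCount cs := by
  induction cs using List.reverseRecOn with
  | nil => simp [conteoAltCore, findClose, gCount]
  | append_singleton ds c ih =>
    rw [gCount_append]
    have hrev : (ds ++ [c]).reverse = c :: ds.reverse := by simp
    by_cases h : c = ')'
    · simp [conteoAltCore, h, findClose]
    · rw [if_neg h]
      rcases hf : findClose ds.reverse with _ | k
      · simp [conteoAltCore, hf] at ih
        simp [conteoAltCore, hrev, findClose, h, hf]
        omega
      · simp only [conteoAltCore, hf] at ih
        simp only [conteoAltCore, hrev, findClose, if_neg h, hf, Option.map_some]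
        have hlen : (ds ++ [c]).length - 1 - (k + 1) = ds.length - 1 - k := by
          have : (ds ++ [c]).length = ds.length + 1 := by simp
          omega
        rw [hlen, List.take_append_of_le_length (by omega), ih]

-- ===== VERDICT (by name: the statement is the Claim_ definition above) =====
theorem conteo_spec : Claim_equal_conteo := by
  intro s _
  show conteo s = conteo_alt s
  rw [conteo, conteo_alt, conteoLoop_eq, conteoAltCore_eq, zero_add]
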